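-- pv_equiv track=rewrite | github.com/melopero/Melopero_APDS-9960 | examples/GestureExample.py | process_gesture_data
-- ===== SOURCE A (Python) =====
-- def process_gesture_data(data, tolerance = 25, time_tolerance = 5):
--     #find peaks
--     peaks = [-1]*4
--     peaks_time = [-1]*4
--     #and lows to detect
--     lows = [100000] * 4
--     for time_step, sample in enumerate(data):
--         for i in range(4):
--             if peaks[i] < sample[i]:
--                 peaks[i] = sample[i]
--                 peaks_time[i] = time_step
--             if lows[i] > sample[i]:
--                 lows[i] = sample[i]
--
--     up_down = 0
--     if peaks[0]-lows[0] > tolerance and peaks[1] - lows[1] > tolerance and abs(peaks_time[0] - peaks_time[1]) > time_tolerance: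
--         up_down = 1 if peaks_time[0] < peaks_time[1] else -1
--
--     right_left = 0
--     if peaks[2]-lows[2] > tolerance and peaks[3] - lows[3] > tolerance and abs(peaks_time[2] - peaks_time[3]) > time_tolerance:
--         right_left = -1 if peaks_time[2] < peaks_time[3] else 1
--
--     if up_down == 0 and right_left == 0:
--         return "No gesture detected"
--
--     ud_string = "up" if up_down > 0 else "down"
--     rl_string = "right" if right_left > 0 else "left"
--
--     return "moved " + ud_string + " " + rl_string
-- ===== SOURCE B (Python) =====
-- def _channel_stats(col):
--     # running scan over one channel: peak value, time of its first occurrence,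
--     # and the lowest reading; baselines -1 / 100000 bound the sensor range
--     peak, peak_time, low = -1, -1, 100000
--     for t, value in enumerate(col):
--         if value > peak:
--             peak, peak_time = value, t
--         if value < low:
--             low = value
--     return peak, peak_time, low
--
-- def process_gesture_data(data, tolerance=25, time_tolerance=5):
--     p0, t0, l0 = _channel_stats([row[0] for row in data])
--     p1, t1, l1 = _channel_stats([row[1] for row in data])
--     p2, t2, l2 = _channel_stats([row[2] for row in data])
--     p3, t3, l3 = _channel_stats([row[3] for row in data])
--
--     up_down = 0
--     if p0 - l0 > tolerance and p1 - l1 > tolerance and abs(t0 - t1) > time_tolerance: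
--         up_down = 1 if t0 < t1 else -1
--
--     right_left = 0
--     if p2 - l2 > tolerance and p3 - l3 > tolerance and abs(t2 - t3) > time_tolerance:
--         right_left = -1 if t2 < t3 else 1
--
--     if up_down == 0 and right_left == 0:
--         return "No gesture detected"
--
--     ud_string = "up" if up_down > 0 else "down"
--     rl_string = "right" if right_left > 0 else "left"
--
--     return "moved " + ud_string + " " + rl_string
-- ===== Notes on version B (the rewrite author's own statement) =====
-- stated objective: alternative
-- what changed: Replaces A's single interleaved pass that updates three 4-cell arrays (peaks/peak-times/lows) per sample with an inner range(4) loop by a columnar decomposition: each channel is extracted as its own column and scanned independently by a per-channel helper returning (peak, peak_time, low); the decision logic is unchanged. Pre_ excludes rows with fewer than 4 entries, on which both A and B raise IndexError.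
import Mathlib
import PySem

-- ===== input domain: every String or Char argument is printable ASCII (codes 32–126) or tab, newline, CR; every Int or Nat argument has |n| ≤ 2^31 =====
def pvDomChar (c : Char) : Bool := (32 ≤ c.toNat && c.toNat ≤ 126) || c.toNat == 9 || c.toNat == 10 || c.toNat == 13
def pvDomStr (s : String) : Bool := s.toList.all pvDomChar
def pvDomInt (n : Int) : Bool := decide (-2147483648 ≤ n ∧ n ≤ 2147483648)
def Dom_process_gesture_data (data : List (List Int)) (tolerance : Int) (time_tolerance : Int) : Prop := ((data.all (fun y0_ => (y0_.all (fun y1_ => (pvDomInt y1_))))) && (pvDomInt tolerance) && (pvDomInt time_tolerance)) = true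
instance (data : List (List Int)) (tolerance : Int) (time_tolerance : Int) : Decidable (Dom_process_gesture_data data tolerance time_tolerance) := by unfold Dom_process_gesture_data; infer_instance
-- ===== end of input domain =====

-- B replaces A's interleaved pass over three 4-cell state arrays by a columnar
-- decomposition: each channel's column is scanned independently; alternative structure, not claimed faster.

-- ===== PORT A =====

-- inner body: 'for i in range(4): if peaks[i] < sample[i]: …; if lows[i] > sample[i]: …'
def pvAInner (sample : List Int) (time_step : Int)
    (st : List Int × List Int × List Int) (i : Int) : List Int × List Int × List Int :=
  let st1 :=
    if PySem.List.pyGetD st.1 i 0 < PySem.List.pyGetD sample i 0 then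
      (PySem.List.pySetD st.1 i (PySem.List.pyGetD sample i 0),
       PySem.List.pySetD st.2.1 i time_step, st.2.2)
    else st
  if PySem.List.pyGetD st1.2.2 i 0 > PySem.List.pyGetD sample i 0 then
    (st1.1, st1.2.1, PySem.List.pySetD st1.2.2 i (PySem.List.pyGetD sample i 0))
  else st1

def pvAStep (st : List Int × List Int × List Int) (ts : Int × List Int) :
    List Int × List Int × List Int :=
  (PySem.List.pyRange 0 4 1).foldl (pvAInner ts.2 ts.1) st

def process_gesture_data (data : List (List Int)) (tolerance : Int) (time_tolerance : Int) : String :=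
  let st := (PySem.List.enumerate data 0).foldl pvAStep
      (([-1, -1, -1, -1] : List Int), ([-1, -1, -1, -1] : List Int),
       ([100000, 100000, 100000, 100000] : List Int))
  let peaks := st.1
  let peaks_time := st.2.1
  let lows := st.2.2
  let up_down : Int :=
    if PySem.List.pyGetD peaks 0 0 - PySem.List.pyGetD lows 0 0 > tolerance ∧
       PySem.List.pyGetD peaks 1 0 - PySem.List.pyGetD lows 1 0 > tolerance ∧
       |PySem.List.pyGetD peaks_time 0 0 - PySem.List.pyGetD peaks_time 1 0| > time_tolerance then
      (if PySem.List.pyGetD peaks_time 0 0 < PySem.List.pyGetD peaks_time 1 0 then 1 else -1)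
    else 0
  let right_left : Int :=
    if PySem.List.pyGetD peaks 2 0 - PySem.List.pyGetD lows 2 0 > tolerance ∧
       PySem.List.pyGetD peaks 3 0 - PySem.List.pyGetD lows 3 0 > tolerance ∧
       |PySem.List.pyGetD peaks_time 2 0 - PySem.List.pyGetD peaks_time 3 0| > time_tolerance then
      (if PySem.List.pyGetD peaks_time 2 0 < PySem.List.pyGetD peaks_time 3 0 then -1 else 1)
    else 0
  if up_down = 0 ∧ right_left = 0 then "No gesture detected"
  else
    let ud_string := if up_down > 0 then "up" else "down"
    let rl_string := if right_left > 0 then "right" else "left"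
    "moved " ++ ud_string ++ " " ++ rl_string

-- ===== PORT B =====

-- '_channel_stats(col)': one loop over the column with state (peak, peak_time, low)
def pvChanStats (col : List Int) : Int × Int × Int :=
  (PySem.List.enumerate col 0).foldl
    (fun st tv =>
      let p := if tv.2 > st.1 then tv.2 else st.1
      let pt := if tv.2 > st.1 then tv.1 else st.2.1
      let l := if tv.2 < st.2.2 then tv.2 else st.2.2
      (p, pt, l))
    (-1, -1, 100000)

def process_gesture_data_alt (data : List (List Int)) (tolerance : Int) (time_tolerance : Int) : String :=
  let c0 := pvChanStats (data.map (fun row => PySem.List.pyGetD row 0 0))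
  let c1 := pvChanStats (data.map (fun row => PySem.List.pyGetD row 1 0))
  let c2 := pvChanStats (data.map (fun row => PySem.List.pyGetD row 2 0))
  let c3 := pvChanStats (data.map (fun row => PySem.List.pyGetD row 3 0))
  let up_down : Int :=
    if c0.1 - c0.2.2 > tolerance ∧ c1.1 - c1.2.2 > tolerance ∧
       |c0.2.1 - c1.2.1| > time_tolerance then
      (if c0.2.1 < c1.2.1 then 1 else -1)
    else 0
  let right_left : Int :=
    if c2.1 - c2.2.2 > tolerance ∧ c3.1 - c3.2.2 > tolerance ∧
       |c2.2.1 - c3.2.1| > time_tolerance then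
      (if c2.2.1 < c3.2.1 then -1 else 1)
    else 0
  if up_down = 0 ∧ right_left = 0 then "No gesture detected"
  else
    let ud_string := if up_down > 0 then "up" else "down"
    let rl_string := if right_left > 0 then "right" else "left"
    "moved " ++ ud_string ++ " " ++ rl_string

-- ===== PRECONDITION & SPEC =====
-- Pre_ excludes rows with fewer than 4 entries: there both Pythons raise IndexError on row[i].
def Pre_process_gesture_data (data : List (List Int)) (tolerance : Int) (time_tolerance : Int) : Prop :=
  ∀ s ∈ data, 4 ≤ s.length
instance (data : List (List Int)) (tolerance : Int) (time_tolerance : Int) : Decidable (Pre_process_gesture_data data tolerance time_tolerance) := by unfold Pre_process_gesture_data; infer_instance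

def pvWitness_process_gesture_data : List (List Int) × Int × Int :=
  ([[0, 30, 0, 0], [30, 0, 0, 0]], 25, 0)

def Spec_process_gesture_data (data : List (List Int)) (tolerance : Int) (time_tolerance : Int) (out : String) : Prop := out = process_gesture_data_alt data tolerance time_tolerance
instance (data : List (List Int)) (tolerance : Int) (time_tolerance : Int) (out : String) : Decidable (Spec_process_gesture_data data tolerance time_tolerance out) := by unfold Spec_process_gesture_data; infer_instance

-- ===== CLAIM (what is proved, stated in full; the proofs are below) =====
def Claim_equal_process_gesture_data : Prop := ∀ (data : List (List Int)) (tolerance : Int) (time_tolerance : Int), Dom_process_gesture_data data tolerance time_tolerance → Pre_process_gesture_data data tolerance time_tolerance → Spec_process_gesture_data data tolerance time_tolerance (process_gesture_data data tolerance time_tolerance)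

-- ===== LEMMAS AND PROOFS =====

-- per-channel running peak/peak-time scan (the per-channel content of A's loop)
def scanPT : List Int → Int → Int → Int → Int × Int
  | [], p, t, _ => (p, t)
  | x :: xs, p, t, time =>
      scanPT xs (if p < x then x else p) (if p < x then time else t) (time + 1)

-- per-channel running low scan
def scanLow : List Int → Int → Int
  | [], l => l
  | x :: xs, l => scanLow xs (if l > x then x else l)

-- the i-th column of the data
def pvCol (data : List (List Int)) (i : Int) : List Int :=
  data.map (fun sample => PySem.List.pyGetD sample i 0)

lemma exists4 {s : List Int} (h : 4 ≤ s.length) :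
    ∃ a b c d r, s = a :: b :: c :: d :: r := by
  match s, h with
  | a :: b :: c :: d :: r, _ => exact ⟨a, b, c, d, r, rfl⟩

lemma chan0 (a b c d : Int) (r : List Int) (time p0 p1 p2 p3 t0 t1 t2 t3 l0 l1 l2 l3 : Int) :
    pvAInner (a :: b :: c :: d :: r) time ([p0, p1, p2, p3], [t0, t1, t2, t3], [l0, l1, l2, l3]) 0 =
      ([if p0 < a then a else p0, p1, p2, p3], [if p0 < a then time else t0, t1, t2, t3], [if l0 > a then a else l0, l1, l2, l3]) := by
  by_cases h : p0 < a <;> by_cases g : l0 > a <;>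
    simp [pvAInner, h, g, PySem.List.pyGetD_ofNat', PySem.List.pySetD_of_nonneg]

lemma chan1 (a b c d : Int) (r : List Int) (time p0 p1 p2 p3 t0 t1 t2 t3 l0 l1 l2 l3 : Int) :
    pvAInner (a :: b :: c :: d :: r) time ([p0, p1, p2, p3], [t0, t1, t2, t3], [l0, l1, l2, l3]) 1 =
      ([p0, if p1 < b then b else p1, p2, p3], [t0, if p1 < b then time else t1, t2, t3], [l0, if l1 > b then b else l1, l2, l3]) := by
  by_cases h : p1 < b <;> by_cases g : l1 > b <;>
    simp [pvAInner, h, g, PySem.List.pyGetD_ofNat', PySem.List.pySetD_of_nonneg]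

lemma chan2 (a b c d : Int) (r : List Int) (time p0 p1 p2 p3 t0 t1 t2 t3 l0 l1 l2 l3 : Int) :
    pvAInner (a :: b :: c :: d :: r) time ([p0, p1, p2, p3], [t0, t1, t2, t3], [l0, l1, l2, l3]) 2 =
      ([p0, p1, if p2 < c then c else p2, p3], [t0, t1, if p2 < c then time else t2, t3], [l0, l1, if l2 > c then c else l2, l3]) := by
  by_cases h : p2 < c <;> by_cases g : l2 > c <;>
    simp [pvAInner, h, g, PySem.List.pyGetD_ofNat', PySem.List.pySetD_of_nonneg]

lemma chan3 (a b c d : Int) (r : List Int) (time p0 p1 p2 p3 t0 t1 t2 t3 l0 l1 l2 l3 : Int) :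
    pvAInner (a :: b :: c :: d :: r) time ([p0, p1, p2, p3], [t0, t1, t2, t3], [l0, l1, l2, l3]) 3 =
      ([p0, p1, p2, if p3 < d then d else p3], [t0, t1, t2, if p3 < d then time else t3], [l0, l1, l2, if l3 > d then d else l3]) := by
  by_cases h : p3 < d <;> by_cases g : l3 > d <;>
    simp [pvAInner, h, g, PySem.List.pyGetD_ofNat', PySem.List.pySetD_of_nonneg]

lemma stepA (a b c d : Int) (r : List Int) (time p0 p1 p2 p3 t0 t1 t2 t3 l0 l1 l2 l3 : Int) :
    pvAStep ([p0, p1, p2, p3], [t0, t1, t2, t3], [l0, l1, l2, l3]) (time, a :: b :: c :: d :: r) =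
      ([if p0 < a then a else p0, if p1 < b then b else p1,
        if p2 < c then c else p2, if p3 < d then d else p3],
       [if p0 < a then time else t0, if p1 < b then time else t1,
        if p2 < c then time else t2, if p3 < d then time else t3],
       [if l0 > a then a else l0, if l1 > b then b else l1,
        if l2 > c then c else l2, if l3 > d then d else l3]) := by
  have hr : PySem.List.pyRange 0 4 1 = [0, 1, 2, 3] := by decide
  unfold pvAStep
  rw [hr]
  simp only [List.foldl_cons, List.foldl_nil]
  rw [chan0, chan1, chan2, chan3]

lemma foldA : ∀ (data : List (List Int)) (time p0 p1 p2 p3 t0 t1 t2 t3 l0 l1 l2 l3 : Int),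
    (∀ s ∈ data, 4 ≤ s.length) →
    (PySem.List.enumerate data time).foldl pvAStep
        ([p0, p1, p2, p3], [t0, t1, t2, t3], [l0, l1, l2, l3]) =
      ([(scanPT (pvCol data 0) p0 t0 time).1, (scanPT (pvCol data 1) p1 t1 time).1,
        (scanPT (pvCol data 2) p2 t2 time).1, (scanPT (pvCol data 3) p3 t3 time).1],
       [(scanPT (pvCol data 0) p0 t0 time).2, (scanPT (pvCol data 1) p1 t1 time).2,
        (scanPT (pvCol data 2) p2 t2 time).2, (scanPT (pvCol data 3) p3 t3 time).2],
       [scanLow (pvCol data 0) l0, scanLow (pvCol data 1) l1,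
        scanLow (pvCol data 2) l2, scanLow (pvCol data 3) l3]) := by
  intro data
  induction data with
  | nil =>
    intro time p0 p1 p2 p3 t0 t1 t2 t3 l0 l1 l2 l3 _
    simp [PySem.List.enumerate, pvCol, scanPT, scanLow]
  | cons s data ih =>
    intro time p0 p1 p2 p3 t0 t1 t2 t3 l0 l1 l2 l3 h
    obtain ⟨a, b, c, d, r, rfl⟩ := exists4 (h _ (List.mem_cons_self ..))
    have hcol : ∀ i : Int, pvCol ((a :: b :: c :: d :: r) :: data) i =
        PySem.List.pyGetD (a :: b :: c :: d :: r) i 0 :: pvCol data i := by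
      intro i; simp [pvCol]
    rw [PySem.List.enumerate_cons, List.foldl_cons, stepA]
    rw [ih (time + 1) _ _ _ _ _ _ _ _ _ _ _ _ (fun s hs => h s (List.mem_cons_of_mem _ hs))]
    rw [hcol 0, hcol 1, hcol 2, hcol 3]
    simp [scanPT, scanLow, PySem.List.pyGetD_ofNat']

-- B's single fold with triple state = the pair of per-channel scans
lemma chanFold : ∀ (col : List Int) (p pt l time : Int),
    (PySem.List.enumerate col time).foldl
      (fun st tv =>
        let pp := if tv.2 > st.1 then tv.2 else st.1
        let ppt := if tv.2 > st.1 then tv.1 else st.2.1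
        let ll := if tv.2 < st.2.2 then tv.2 else st.2.2
        (pp, ppt, ll))
      (p, pt, l) =
    ((scanPT col p pt time).1, (scanPT col p pt time).2, scanLow col l) := by
  intro col
  induction col with
  | nil => intro p pt l time; simp [PySem.List.enumerate, scanPT, scanLow]
  | cons x xs ih =>
    intro p pt l time
    rw [PySem.List.enumerate_cons, List.foldl_cons, scanPT, scanLow]
    simp only []
    rw [ih]

lemma chanStats_eq (data : List (List Int)) (i : Int) :
    pvChanStats (data.map (fun row => PySem.List.pyGetD row i 0)) =
      ((scanPT (pvCol data i) (-1) (-1) 0).1, (scanPT (pvCol data i) (-1) (-1) 0).2,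
       scanLow (pvCol data i) 100000) := by
  unfold pvChanStats pvCol
  exact chanFold _ (-1) (-1) 100000 0

-- ===== VERDICT (by name: the statement is the Claim_ definition above) =====
theorem process_gesture_data_spec : Claim_equal_process_gesture_data := by
  intro data tolerance time_tolerance _ hpre
  unfold Spec_process_gesture_data process_gesture_data process_gesture_data_alt
  rw [foldA data 0 (-1) (-1) (-1) (-1) (-1) (-1) (-1) (-1) 100000 100000 100000 100000 hpre]
  rw [chanStats_eq data 0, chanStats_eq data 1, chanStats_eq data 2, chanStats_eq data 3]
  simp [PySem.List.pyGetD_ofNat']
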